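-- pv_equiv track=rewrite | github.com/THU-ATOM/Pocket-Detection-of-DTWG | template_matching/pocket_match.py | get_AF2_matched_ids
-- ===== SOURCE A (Python) =====
-- def remove_gaps(seq1,seq2):
--     assert len(seq1)==len(seq2)
--     new_seq1=""
--     new_seq2=""
--     for i in range(len(seq1)):
--         if seq1[i]!="-" :
--             new_seq1+=seq1[i]
--             new_seq2+=seq2[i]
--     return new_seq1,new_seq2
--
-- def get_AF2_matched_ids(AF2_seq,pdbbind_seq,pos_to_id):
--     AF2_seq,pdbbind_seq=remove_gaps(AF2_seq,pdbbind_seq)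
--     assert len(AF2_seq)==len(pos_to_id)
--     ret=set()
--     for i in range(len(pdbbind_seq)):
--         if pdbbind_seq[i]!="-":
--             ret.add(pos_to_id[i])
--     return ret
-- ===== SOURCE B (Python) =====
-- def get_AF2_matched_ids(AF2_seq, pdbbind_seq, pos_to_id):
--     assert len(AF2_seq) == len(pdbbind_seq)
--     assert sum(1 for a in AF2_seq if a != "-") == len(pos_to_id)
--     ret = set()
--     j = 0
--     for a, b in zip(AF2_seq, pdbbind_seq):
--         if a != "-":
--             if b != "-":
--                 ret.add(pos_to_id[j])
--             j += 1
--     return ret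
-- ===== Notes on version B (the rewrite author's own statement) =====
-- stated objective: simpler
-- what changed: Drops the remove_gaps helper and its two intermediate filtered strings: one zipped pass over the aligned sequences with a running index into pos_to_id, after up-front length/count asserts that preserve A's AssertionErrors.
import Mathlib
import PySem

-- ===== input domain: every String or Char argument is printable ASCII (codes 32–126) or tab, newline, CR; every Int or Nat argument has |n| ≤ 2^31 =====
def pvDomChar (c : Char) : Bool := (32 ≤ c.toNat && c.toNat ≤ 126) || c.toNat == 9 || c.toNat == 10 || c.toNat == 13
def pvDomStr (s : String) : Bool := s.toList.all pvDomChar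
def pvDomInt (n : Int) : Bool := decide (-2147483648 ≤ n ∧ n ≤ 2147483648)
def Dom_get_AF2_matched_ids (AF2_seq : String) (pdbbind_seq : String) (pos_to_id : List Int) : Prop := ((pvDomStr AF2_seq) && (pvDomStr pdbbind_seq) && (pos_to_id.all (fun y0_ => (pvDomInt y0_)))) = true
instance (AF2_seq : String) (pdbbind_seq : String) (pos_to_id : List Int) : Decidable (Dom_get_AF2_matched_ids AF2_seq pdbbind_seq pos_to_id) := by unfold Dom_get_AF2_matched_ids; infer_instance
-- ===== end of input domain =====

-- B drops the remove_gaps helper and its intermediate filtered strings in favour of a single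
-- zipped pass with a running index into pos_to_id (simpler; return value only — neither mutates).

-- ===== PORT A =====
-- port of helper remove_gaps: loop over range(len(seq1)) appending the kept characters of both strings
def pvRemoveGaps (seq1 seq2 : List Char) : List Char × List Char :=
  (PySem.List.pyRange 0 seq1.length 1).foldl
    (fun st i =>
      if PySem.List.pyGetD seq1 i ' ' ≠ '-' then
        (st.1 ++ [PySem.List.pyGetD seq1 i ' '], st.2 ++ [PySem.List.pyGetD seq2 i ' '])
      else st)
    ([], [])

def get_AF2_matched_ids (AF2_seq : String) (pdbbind_seq : String) (pos_to_id : List Int) : List Int :=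
  let p := pvRemoveGaps AF2_seq.toList pdbbind_seq.toList
  (PySem.List.pyRange 0 p.2.length 1).foldl
    (fun ret i =>
      if PySem.List.pyGetD p.2 i ' ' ≠ '-' then
        PySem.Set.add ret (PySem.List.pyGetD pos_to_id i 0)
      else ret)
    PySem.Set.empty

-- ===== PORT B =====
-- the zipped loop of Source B: j counts non-gap AF2 positions, ids are added when the paired char is non-gap
def pvAltLoop (pairs : List (Char × Char)) (pos_to_id : List Int) (j : Int) (ret : PySem.Set Int) : PySem.Set Int :=
  match pairs with
  | [] => ret
  | (a, b) :: rest =>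
    if a ≠ '-' then
      pvAltLoop rest pos_to_id (j + 1)
        (if b ≠ '-' then PySem.Set.add ret (PySem.List.pyGetD pos_to_id j 0) else ret)
    else pvAltLoop rest pos_to_id j ret

def get_AF2_matched_ids_alt (AF2_seq : String) (pdbbind_seq : String) (pos_to_id : List Int) : List Int :=
  pvAltLoop (AF2_seq.toList.zip pdbbind_seq.toList) pos_to_id 0 PySem.Set.empty

-- ===== PRECONDITION & SPEC =====
-- Pre_ excludes exactly the inputs where A raises AssertionError: unequal sequence lengths,
-- or a pos_to_id whose length differs from the number of non-gap AF2 characters.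
def Pre_get_AF2_matched_ids (AF2_seq : String) (pdbbind_seq : String) (pos_to_id : List Int) : Prop :=
  AF2_seq.toList.length = pdbbind_seq.toList.length ∧
  AF2_seq.toList.countP (fun a => decide (a ≠ '-')) = pos_to_id.length
instance (AF2_seq : String) (pdbbind_seq : String) (pos_to_id : List Int) : Decidable (Pre_get_AF2_matched_ids AF2_seq pdbbind_seq pos_to_id) := by unfold Pre_get_AF2_matched_ids; infer_instance
def pvWitness_get_AF2_matched_ids : String × String × List Int := ("A-B", "AB-", [1, 2])
def Spec_get_AF2_matched_ids (AF2_seq : String) (pdbbind_seq : String) (pos_to_id : List Int) (out : List Int) : Prop := out = get_AF2_matched_ids_alt AF2_seq pdbbind_seq pos_to_id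
instance (AF2_seq : String) (pdbbind_seq : String) (pos_to_id : List Int) (out : List Int) : Decidable (Spec_get_AF2_matched_ids AF2_seq pdbbind_seq pos_to_id out) := by unfold Spec_get_AF2_matched_ids; infer_instance

-- ===== CLAIM (what is proved, stated in full; the proofs are below) =====
def Claim_equal_get_AF2_matched_ids : Prop := ∀ (AF2_seq : String) (pdbbind_seq : String) (pos_to_id : List Int), Dom_get_AF2_matched_ids AF2_seq pdbbind_seq pos_to_id → Pre_get_AF2_matched_ids AF2_seq pdbbind_seq pos_to_id → Spec_get_AF2_matched_ids AF2_seq pdbbind_seq pos_to_id (get_AF2_matched_ids AF2_seq pdbbind_seq pos_to_id)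

-- ===== LEMMAS AND PROOFS =====

theorem pv_pyGetD_zip {α β : Type} (xs : List α) (ys : List β) (i : Int) (d : α) (e : β)
    (h0 : 0 ≤ i) (h1 : i < (xs.length : Int)) (h2 : i < (ys.length : Int)) :
    PySem.List.pyGetD (xs.zip ys) i (d, e) =
      (PySem.List.pyGetD xs i d, PySem.List.pyGetD ys i e) := by
  have hz : i < ((xs.zip ys).length : Int) := by
    simp [List.length_zip]; omega
  rw [PySem.List.pyGetD_eq_getElem _ _ h0 hz, PySem.List.pyGetD_eq_getElem _ _ h0 h1,
      PySem.List.pyGetD_eq_getElem _ _ h0 h2, List.getElem_zip]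

-- remove_gaps computes the two projections of the fst-filtered zip
theorem pvRemoveGaps_eq (xs ys : List Char) (h : xs.length = ys.length) :
    pvRemoveGaps xs ys =
      (((xs.zip ys).filter (fun q => decide (q.1 ≠ '-'))).map Prod.fst,
       ((xs.zip ys).filter (fun q => decide (q.1 ≠ '-'))).map Prod.snd) := by
  unfold pvRemoveGaps
  have hlen : ((xs.zip ys).length : Int) = (xs.length : Int) := by
    simp [List.length_zip, h]
  have hcongr :
      (PySem.List.pyRange 0 xs.length 1).foldl
        (fun st i =>
          if PySem.List.pyGetD xs i ' ' ≠ '-' then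
            (st.1 ++ [PySem.List.pyGetD xs i ' '], st.2 ++ [PySem.List.pyGetD ys i ' '])
          else st) ([], []) =
      (PySem.List.pyRange 0 xs.length 1).foldl
        (fun st i =>
          (fun (st : List Char × List Char) (q : Char × Char) =>
            if q.1 ≠ '-' then (st.1 ++ [q.1], st.2 ++ [q.2]) else st)
            st (PySem.List.pyGetD (xs.zip ys) i (' ', ' '))) ([], []) := by
    apply PySem.List.foldl_congr_mem
    intro st i hi
    rw [PySem.List.mem_pyRange_one] at hi
    rw [pv_pyGetD_zip xs ys i ' ' ' ' hi.1 (by exact_mod_cast hi.2) (by rw [← h]; exact_mod_cast hi.2)]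
  rw [hcongr]
  rw [show ((xs.length : Int)) = ((xs.zip ys).length : Int) from hlen.symm]
  rw [PySem.List.foldl_pyRange_zero_pyGetD' (xs.zip ys) (' ', ' ')
       (fun (st : List Char × List Char) (q : Char × Char) =>
         if q.1 ≠ '-' then (st.1 ++ [q.1], st.2 ++ [q.2]) else st) ([], [])]
  rw [PySem.List.foldl_ite_eq_foldl_filter (fun q : Char × Char => q.1 ≠ '-')]
  rw [PySem.List.foldl_prod_mk (f := fun s (e : Char × Char) => s ++ [e.1])
       (g := fun s (e : Char × Char) => s ++ [e.2])]
  rw [PySem.List.foldl_append_singleton_eq_map, PySem.List.foldl_append_singleton_eq_map]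
  simp

-- A's second loop over two parallel lists of equal length is a fold over their zip
theorem pvALoop2_eq (zs : List Char) (pos : List Int) (h : zs.length = pos.length) :
    (PySem.List.pyRange 0 zs.length 1).foldl
      (fun ret i =>
        if PySem.List.pyGetD zs i ' ' ≠ '-' then
          PySem.Set.add ret (PySem.List.pyGetD pos i 0)
        else ret) PySem.Set.empty =
    (zs.zip pos).foldl
      (fun ret q => if q.1 ≠ '-' then PySem.Set.add ret q.2 else ret) PySem.Set.empty := by
  have hlen : ((zs.zip pos).length : Int) = (zs.length : Int) := by
    simp [List.length_zip, h]
  have hcongr :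
      (PySem.List.pyRange 0 zs.length 1).foldl
        (fun ret i =>
          if PySem.List.pyGetD zs i ' ' ≠ '-' then
            PySem.Set.add ret (PySem.List.pyGetD pos i 0)
          else ret) PySem.Set.empty =
      (PySem.List.pyRange 0 zs.length 1).foldl
        (fun ret i =>
          (fun (ret : PySem.Set Int) (q : Char × Int) =>
            if q.1 ≠ '-' then PySem.Set.add ret q.2 else ret)
            ret (PySem.List.pyGetD (zs.zip pos) i (' ', 0))) PySem.Set.empty := by
    apply PySem.List.foldl_congr_mem
    intro ret i hi
    rw [PySem.List.mem_pyRange_one] at hi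
    rw [pv_pyGetD_zip zs pos i ' ' 0 hi.1 (by exact_mod_cast hi.2) (by rw [← h]; exact_mod_cast hi.2)]
  rw [hcongr]
  rw [show ((zs.length : Int)) = ((zs.zip pos).length : Int) from hlen.symm]
  rw [PySem.List.foldl_pyRange_zero_pyGetD' (zs.zip pos) (' ', 0)
       (fun (ret : PySem.Set Int) (q : Char × Int) =>
         if q.1 ≠ '-' then PySem.Set.add ret q.2 else ret) PySem.Set.empty]

-- B's loop with counter j equals the fold over the filtered-snd list zipped with pos.drop j
theorem pvAltLoop_eq (pairs : List (Char × Char)) (pos : List Int) (j : Nat) (ret : PySem.Set Int)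
    (h : j + pairs.countP (fun q => decide (q.1 ≠ '-')) ≤ pos.length) :
    pvAltLoop pairs pos (j : Int) ret =
      (((pairs.filter (fun q => decide (q.1 ≠ '-'))).map Prod.snd).zip (pos.drop j)).foldl
        (fun ret q => if q.1 ≠ '-' then PySem.Set.add ret q.2 else ret) ret := by
  induction pairs generalizing j ret with
  | nil => simp [pvAltLoop]
  | cons hd tl ih =>
    obtain ⟨a, b⟩ := hd
    by_cases ha : a = '-'
    · subst ha
      simp only [pvAltLoop, List.filter_cons] at *
      simp only [ne_eq, not_true_eq_false, if_false, decide_false] at *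
      simp only [decide_not] at *
      simpa using ih j ret (by simpa using h)
    · have hc : tl.countP (fun q => decide (q.1 ≠ '-')) + 1 =
          ((a, b) :: tl).countP (fun q => decide (q.1 ≠ '-')) := by
        simp [ha]
      have hj : j < pos.length := by omega
      have hstep : pvAltLoop ((a, b) :: tl) pos (j : Int) ret =
          pvAltLoop tl pos ((j : Int) + 1)
            (if b ≠ '-' then PySem.Set.add ret (PySem.List.pyGetD pos (j : Int) 0) else ret) := by
        simp [pvAltLoop, ha]
      rw [hstep]
      have hcast : ((j : Int) + 1) = (((j + 1 : Nat)) : Int) := by push_cast; ring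
      rw [hcast, ih (j + 1) _ (by omega)]
      have hget : PySem.List.pyGetD pos (j : Int) 0 = pos[j] := by
        rw [PySem.List.pyGetD_natCast]
        exact List.getD_eq_getElem pos 0 hj
      have hdrop : pos.drop j = pos[j] :: pos.drop (j + 1) := List.drop_eq_getElem_cons hj
      rw [hget]
      simp [ha]
      rw [List.drop_eq_getElem_cons hj, List.zip_cons_cons, List.foldl_cons]

-- countP of the fst-condition over the zip equals countP over the first list (equal lengths)
theorem pv_countP_zip_fst (xs ys : List Char) (h : xs.length = ys.length) :
    (xs.zip ys).countP (fun q => decide (q.1 ≠ '-')) = xs.countP (fun a => decide (a ≠ '-')) := by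
  induction xs generalizing ys with
  | nil => simp
  | cons a tl ih =>
    cases ys with
    | nil => simp at h
    | cons b tys =>
      simp only [List.zip_cons_cons, List.countP_cons]
      rw [ih tys (by simpa using h)]

-- ===== VERDICT (by name: the statement is the Claim_ definition above) =====
theorem get_AF2_matched_ids_spec : Claim_equal_get_AF2_matched_ids := by
  intro AF2_seq pdbbind_seq pos_to_id _ hpre
  obtain ⟨h1, h2⟩ := hpre
  unfold Spec_get_AF2_matched_ids get_AF2_matched_ids get_AF2_matched_ids_alt
  set xs := AF2_seq.toList
  set ys := pdbbind_seq.toList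
  have hcz : (xs.zip ys).countP (fun q => decide (q.1 ≠ '-')) = pos_to_id.length := by
    rw [pv_countP_zip_fst xs ys h1, h2]
  have hflen : (((xs.zip ys).filter (fun q => decide (q.1 ≠ '-'))).map Prod.snd).length
      = pos_to_id.length := by
    rw [List.length_map, ← List.countP_eq_length_filter, hcz]
  simp only [pvRemoveGaps_eq xs ys h1]
  rw [pvALoop2_eq _ pos_to_id hflen]
  rw [show ((0 : Int)) = ((0 : Nat) : Int) from rfl,
      pvAltLoop_eq (xs.zip ys) pos_to_id 0 PySem.Set.empty (by omega)]
  simp
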